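-- pv_equiv track=rewrite | github.com/multimodal-interpretability/FIND | src/make_functions/make_strings/string_functions.py | capitalize_alternating_letters
-- ===== SOURCE A (Python) =====
-- def capitalize_alternating_letters(string):
--     capitalized_string = ""
--     for i, char in enumerate(string):
--         if i % 2 == 0:
--             capitalized_string += char.upper()
--         else:
--             capitalized_string += char.lower()
--     return capitalized_string
-- ===== SOURCE B (Python) =====
-- def capitalize_alternating_letters(string):
--     out = []
--     n = len(string)
--     i = 0
--     while i + 1 < n:
--         out.append(string[i].upper())
--         out.append(string[i + 1].lower())
--         i += 2
--     if i < n: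
--         out.append(string[i].upper())
--     return "".join(out)
-- ===== Notes on version B (the rewrite author's own statement) =====
-- stated objective: alternative
-- what changed: Replaces the indexed enumerate loop with a parity test and quadratic string += by a two-characters-per-step sweep that appends upper/lower pairs to a list and joins once at the end (no index-parity test, no string concatenation in the loop).
import Mathlib
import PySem

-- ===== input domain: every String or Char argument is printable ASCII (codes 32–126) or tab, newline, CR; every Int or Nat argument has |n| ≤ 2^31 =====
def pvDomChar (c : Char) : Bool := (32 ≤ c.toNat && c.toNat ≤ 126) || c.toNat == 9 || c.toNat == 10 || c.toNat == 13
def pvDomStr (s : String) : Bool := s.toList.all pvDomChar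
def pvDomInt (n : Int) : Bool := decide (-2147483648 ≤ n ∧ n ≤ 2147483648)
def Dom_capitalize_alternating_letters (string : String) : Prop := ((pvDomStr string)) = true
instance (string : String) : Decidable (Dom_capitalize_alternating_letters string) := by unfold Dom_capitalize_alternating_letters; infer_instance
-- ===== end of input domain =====

-- B replaces the indexed parity-testing loop with string += by a two-characters-per-step
-- sweep collected in a list and joined once (objective: alternative decomposition).

-- ===== PORT A =====
-- for i, char in enumerate(string): if i % 2 == 0: acc += char.upper() else: acc += char.lower()
def capitalize_alternating_letters (string : String) : String :=
  (PySem.List.enumerate string.toList 0).foldl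
    (fun acc p =>
      if PySem.Int.mod p.1 2 == 0 then acc ++ String.ofList [PySem.Chars.upperChar p.2]
      else acc ++ String.ofList [PySem.Chars.lowerChar p.2]) ""

-- ===== PORT B =====
-- Source B's while loop consumes two characters per step (one uppercased, one lowercased),
-- the single trailing character is uppercased; the final "".join is String.ofList
def altPairs : List Char → List Char
  | [] => []
  | [c] => [PySem.Chars.upperChar c]
  | c :: d :: rest => PySem.Chars.upperChar c :: PySem.Chars.lowerChar d :: altPairs rest

def capitalize_alternating_letters_alt (string : String) : String :=
  String.ofList (altPairs string.toList)

-- ===== PRECONDITION & SPEC =====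
def Spec_capitalize_alternating_letters (string : String) (out : String) : Prop := out = capitalize_alternating_letters_alt string
instance (string : String) (out : String) : Decidable (Spec_capitalize_alternating_letters string out) := by unfold Spec_capitalize_alternating_letters; infer_instance

-- ===== CLAIM (what is proved, stated in full; the proofs are below) =====
def Claim_equal_capitalize_alternating_letters : Prop := ∀ (string : String), Dom_capitalize_alternating_letters string → Spec_capitalize_alternating_letters string (capitalize_alternating_letters string)

-- ===== LEMMAS AND PROOFS =====

-- A's loop body mapped over the tail whose first character has index s
def altFrom (s : Int) : List Char → List Char
  | [] => []
  | c :: rest =>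
      (if PySem.Int.mod s 2 == 0 then PySem.Chars.upperChar c else PySem.Chars.lowerChar c)
        :: altFrom (s + 1) rest

theorem foldA_eq_altFrom (l : List Char) (s : Int) (acc : String) :
    (PySem.List.enumerate l s).foldl
      (fun acc p =>
        if PySem.Int.mod p.1 2 == 0 then acc ++ String.ofList [PySem.Chars.upperChar p.2]
        else acc ++ String.ofList [PySem.Chars.lowerChar p.2]) acc
      = acc ++ String.ofList (altFrom s l) := by
  induction l generalizing s acc with
  | nil => simp [altFrom, PySem.List.enumerate]
  | cons c rest ih =>
      rw [PySem.List.enumerate_cons]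
      simp only [List.foldl_cons, ih, altFrom]
      split <;> rw [String.append_assoc, ← String.ofList_append, List.singleton_append]

theorem altFrom_shift (l : List Char) (s : Int) : altFrom (s + 2) l = altFrom s l := by
  induction l generalizing s with
  | nil => rfl
  | cons c rest ih =>
      have hm : PySem.Int.mod (s + 2) 2 = PySem.Int.mod s 2 := by
        simp [PySem.Int.mod]
      have h : s + 2 + 1 = s + 1 + 2 := by ring
      simp only [altFrom, hm, h, ih]

theorem altFrom_zero : ∀ l, altFrom 0 l = altPairs l
  | [] => rfl
  | [c] => by simp [altFrom, altPairs, PySem.Int.mod]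
  | c :: d :: rest => by
      have h2 : altFrom 2 rest = altPairs rest := by
        rw [show (2 : Int) = 0 + 2 from by ring, altFrom_shift]
        exact altFrom_zero rest
      simp [altFrom, altPairs, PySem.Int.mod, h2]

-- ===== VERDICT (by name: the statement is the Claim_ definition above) =====
theorem capitalize_alternating_letters_spec : Claim_equal_capitalize_alternating_letters := by
  intro s _
  unfold Spec_capitalize_alternating_letters capitalize_alternating_letters capitalize_alternating_letters_alt
  rw [foldA_eq_altFrom, altFrom_zero]
  simp
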